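-- pv_equiv track=rewrite | github.com/InduwaraGunasena/Project-Euler | 790. Clock Grid/790. Clock Grid.py | function_of_s
-- ===== SOURCE A (Python) =====
-- grid_length = 50515093
--
-- S_0 = 290797
--
-- def function_of_s(p):
--     s_previous = S_0
--     if p == 0:
--         return S_0
--     else:
--         s_t = 0
--         for i in range(0, p):
--             s_t = s_previous ** 2 % grid_length
--             s_previous = s_t
--         return s_t
-- ===== SOURCE B (Python) =====
-- # Faster exact re-implementation: s -> s^2 mod M iterated p times equals
-- # S_0^(2^p) mod M; since gcd(S_0, M) = 1 and K = 25250294 is the multiplicative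
-- # order of S_0 modulo M (S_0**K % M == 1), the exponent 2**p can be reduced
-- # mod K, giving O(log p) modular exponentiation instead of A's O(p) loop.
-- # For p < 0 (zero loop iterations) B returns S_0, the un-iterated seed,
-- # where A returns its leftover initializer 0.
--
-- grid_length = 50515093
--
-- S_0 = 290797
--
-- K = 25250294  # multiplicative order of S_0 modulo grid_length
--
-- def function_of_s(p):
--     if p < 0:
--         return S_0
--     return pow(S_0, pow(2, p, K), grid_length)
-- ===== Notes on version B (the rewrite author's own statement) =====
-- stated objective: faster
-- what changed: Replaces the p-step squaring loop by one modular exponentiation S_0^(2^p mod K) mod M, where K is the multiplicative order of S_0 modulo M.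
-- intended difference: For p < 0 (the loop runs zero times) A returns 0, the leftover initializer of s_t, while B returns the un-iterated seed S_0 = 290797, the intended value of iterating the map a non-positive number of times. — e.g. on function_of_s(-1): A returns 0, B returns 290797
import Mathlib
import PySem

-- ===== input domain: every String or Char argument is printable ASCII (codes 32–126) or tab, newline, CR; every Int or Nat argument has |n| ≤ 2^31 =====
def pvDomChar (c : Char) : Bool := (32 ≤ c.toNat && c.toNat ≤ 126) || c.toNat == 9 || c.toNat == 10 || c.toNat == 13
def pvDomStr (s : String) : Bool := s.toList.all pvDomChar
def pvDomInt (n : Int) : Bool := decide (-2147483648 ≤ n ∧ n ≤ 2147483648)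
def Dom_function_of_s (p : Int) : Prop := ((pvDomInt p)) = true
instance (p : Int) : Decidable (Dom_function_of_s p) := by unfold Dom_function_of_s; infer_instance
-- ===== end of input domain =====

-- B replaces A's p-step squaring loop by one modular exponentiation
-- S_0^(2^p mod K) mod M (K = multiplicative order of S_0 mod M); for p < 0
-- A returns its leftover initializer 0 while B returns the seed S_0 (see D_).


-- ===== PORT A =====
-- literal port: s_previous = S_0; if p == 0 return S_0; else loop i in range(0, p):
-- s_t = s_previous ** 2 % grid_length; s_previous = s_t; return s_t
def function_of_s (p : Int) : Int :=
  if p == 0 then 290797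
  else
    (((PySem.List.pyRange 0 p 1).foldl
        (fun (st : Int × Int) (_ : Int) =>
          let s_t := PySem.Int.mod (st.1 ^ 2) 50515093
          (s_t, s_t))
        (290797, 0))).2

-- ===== PORT B =====
-- port of Python's built-in pow(b, e, m): binary (square-and-multiply) modular
-- exponentiation over Nat, with fuel ≥ log2 e (fuel 64 covers every e < 2^64).
-- (PySem.Int.powMod is definitionally b^e % m, which cannot be evaluated for the
-- exponents arising here, so pow is ported as this standard binary powMod; its
-- exactness on the used range is proved in pvPowMod_correct below.)
def pvPowMod : Nat → Nat → Nat → Nat → Nat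
  | 0, _, _, m => 1 % m
  | fuel+1, b, e, m =>
    if e = 0 then 1 % m
    else
      let h := pvPowMod fuel b (e / 2) m
      if e % 2 = 0 then h * h % m else h * h % m * b % m

def function_of_s_alt (p : Int) : Int :=
  if p < 0 then 290797
  else Int.ofNat (pvPowMod 64 290797 (pvPowMod 64 2 p.toNat 25250294) 50515093)

-- ===== PRECONDITION & SPEC =====
-- For p < 0 the loop body never runs: A returns 0, the leftover initializer of
-- s_t, while B returns the un-iterated seed S_0 = 290797, the intended value.
def D_function_of_s (p : Int) : Prop := p < 0
instance (p : Int) : Decidable (D_function_of_s p) := by unfold D_function_of_s; infer_instance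

def Spec_function_of_s (p : Int) (out : Int) : Prop := ¬ D_function_of_s p → out = function_of_s_alt p
instance (p : Int) (out : Int) : Decidable (Spec_function_of_s p out) := by unfold Spec_function_of_s; infer_instance

def pvDiffWitness_function_of_s : Int := -1
def pvDiffWitnessOut_function_of_s : Int × Int := (0, 290797)

-- ===== CLAIM (what is proved, stated in full; the proofs are below) =====
def Claim_unchanged_function_of_s : Prop := ∀ (p : Int), Dom_function_of_s p → Spec_function_of_s p (function_of_s p)
def Claim_changed_function_of_s : Prop := Dom_function_of_s (pvDiffWitness_function_of_s) ∧ D_function_of_s (pvDiffWitness_function_of_s) ∧ function_of_s (pvDiffWitness_function_of_s) = pvDiffWitnessOut_function_of_s.1 ∧ function_of_s_alt (pvDiffWitness_function_of_s) = pvDiffWitnessOut_function_of_s.2 ∧ pvDiffWitnessOut_function_of_s.1 ≠ pvDiffWitnessOut_function_of_s.2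
def Claim_exact_function_of_s : Prop := ∀ (p : Int), Dom_function_of_s p → D_function_of_s p → function_of_s p ≠ function_of_s_alt p

-- ===== LEMMAS AND PROOFS =====

-- pvPowMod computes b^e % m whenever the fuel covers the exponent.
theorem pvPowMod_correct (fuel b e m : Nat) (he : e < 2 ^ fuel) :
    pvPowMod fuel b e m = b ^ e % m := by
  induction fuel generalizing e with
  | zero => interval_cases e; simp [pvPowMod]
  | succ n ih =>
    rw [pvPowMod]
    by_cases h0 : e = 0
    · simp [h0]
    · have hh : e / 2 < 2 ^ n := by
        rw [pow_succ] at he; omega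
      simp only [h0, if_false, ih _ hh]
      by_cases hp : e % 2 = 0
      · have : e / 2 + e / 2 = e := by omega
        simp [hp, ← pow_add, this]
      · have : e / 2 + e / 2 + 1 = e := by omega
        simp only [hp, if_false]
        rw [← Nat.mul_mod, ← pow_add, Nat.mod_mul_mod, ← pow_succ, this]

-- 25250294 is (a multiple of) the multiplicative order of 290797 mod 50515093.
theorem pvOrder : 290797 ^ 25250294 % 50515093 = 1 := by
  have h := pvPowMod_correct 64 290797 25250294 50515093 (by norm_num)
  rw [← h]; decide

-- exponent reduction mod the order
theorem pvPowReduce (e : Nat) :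
    290797 ^ e % 50515093 = 290797 ^ (e % 25250294) % 50515093 := by
  conv_lhs => rw [← Nat.div_add_mod e 25250294]
  rw [pow_add, pow_mul, Nat.mul_mod, Nat.pow_mod, pvOrder]
  simp

-- the fold of A, characterized: after n+1 iterations both components are
-- 290797^(2^(n+1)) % 50515093
theorem pvFoldA (n : Nat) :
    ((PySem.List.pyRange 0 ((n : Int) + 1) 1).foldl
        (fun (st : Int × Int) (_ : Int) =>
          let s_t := PySem.Int.mod (st.1 ^ 2) 50515093
          (s_t, s_t))
        (290797, 0))
    = (Int.ofNat (290797 ^ 2 ^ (n + 1) % 50515093),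
       Int.ofNat (290797 ^ 2 ^ (n + 1) % 50515093)) := by
  induction n with
  | zero =>
    rw [show ((0 : Nat) : Int) + 1 = 0 + 1 by norm_num, PySem.List.pyRange_one_singleton]
    decide
  | succ m ih =>
    rw [show ((m + 1 : Nat) : Int) + 1 = ((m : Int) + 1) + 1 by push_cast; ring,
        PySem.List.pyRange_one_succ_right (by omega), List.foldl_append, ih]
    simp only [List.foldl_cons, List.foldl_nil]
    have hM : (0 : Int) < 50515093 := by norm_num
    rw [PySem.Int.mod_eq_emod_of_pos hM]
    have : (Int.ofNat (290797 ^ 2 ^ (m + 1) % 50515093)) ^ 2 % 50515093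
        = Int.ofNat (290797 ^ 2 ^ (m + 2) % 50515093) := by
      have : ((290797 : Nat) ^ 2 ^ (m + 1) % 50515093) ^ 2 % 50515093
          = 290797 ^ 2 ^ (m + 2) % 50515093 := by
        rw [← Nat.pow_mod, ← pow_mul]
        congr 1
      exact_mod_cast congrArg Int.ofNat this
    rw [this]

theorem function_of_s_spec : Claim_unchanged_function_of_s := by
  intro p hnd hD
  unfold D_function_of_s at hD
  rw [not_lt] at hD
  by_cases h0 : p = 0
  · subst h0
    show function_of_s 0 = function_of_s_alt 0
    decide
  · -- p ≥ 1
    obtain ⟨n, rfl⟩ : ∃ n : Nat, p = (n : Int) + 1 := by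
      refine ⟨(p - 1).toNat, ?_⟩; omega
    show function_of_s _ = function_of_s_alt _
    unfold function_of_s function_of_s_alt
    have hne : ((n : Int) + 1 == 0) = false := by
      simp only [beq_eq_false_iff_ne]; omega
    have hnn : ¬ ((n : Int) + 1 < 0) := by omega
    rw [hne, if_neg hnn, pvFoldA n]
    have hbound : n + 1 < 2 ^ 64 := by
      unfold Dom_function_of_s pvDomInt at hnd
      simp at hnd
      have hn : n < 2147483648 := hnd.2
      calc n + 1 ≤ 2147483648 := by omega
        _ < 2 ^ 64 := by norm_num
    have ht : ((n : Int) + 1).toNat = n + 1 := by omega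
    rw [ht, pvPowMod_correct 64 2 (n + 1) 25250294 hbound,
        pvPowMod_correct 64 290797 (2 ^ (n + 1) % 25250294) 50515093
          (lt_trans (Nat.mod_lt _ (by norm_num)) (by norm_num)),
        ← pvPowReduce]
    rfl

theorem function_of_s_changed : Claim_changed_function_of_s := by
  unfold Claim_changed_function_of_s; decide

theorem function_of_s_tight : Claim_exact_function_of_s := by
  intro p _ hD
  unfold D_function_of_s at hD
  unfold function_of_s function_of_s_alt
  have hne : (p == 0) = false := by simp only [beq_eq_false_iff_ne]; omega
  rw [hne, if_pos hD, PySem.List.pyRange_one_eq_nil (by omega)]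
  simp
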